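-- pv_equiv track=rewrite | github.com/Avinash-311205/Stripe_Practice | minpenalty.py | getminimaltime
-- ===== SOURCE A (Python) =====
-- def getminimaltime(log: str):
--     n = len(log)
--
--     penalty = log.count("Y")
--
--     min_penalty = penalty
--     best_closing_time = 0
--
--     for t in range(n):
--         if log[t] == "Y":
--             penalty -= 1
--         else:
--             penalty += 1
--
--         if penalty < min_penalty:
--             min_penalty = penalty
--             best_closing_time = t + 1
--
--     return best_closing_time
-- ===== SOURCE B (Python) =====
-- def getminimaltime(log: str):
--     ytotal = log.count("Y")
--
--     # materialize prefix-count tables: nprefix[c]/yprefix[c] = #'N'-like / #'Y' in log[:c]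
--     nprefix = [0]
--     yprefix = [0]
--     ncnt = 0
--     ycnt = 0
--     for ch in log:
--         if ch == "Y":
--             ycnt += 1
--         else:
--             ncnt += 1
--         nprefix.append(ncnt)
--         yprefix.append(ycnt)
--
--     penalty = [nprefix[c] + ytotal - yprefix[c] for c in range(len(log) + 1)]
--
--     best = 0
--     for c in range(1, len(log) + 1):
--         if penalty[c] < penalty[best]:
--             best = c
--     return best
-- ===== Notes on version B (the rewrite author's own statement) =====
-- stated objective: alternative
-- what changed: Replaced A's single running-penalty pass (incremental min tracking with the penalty updated in place) by materialized prefix-count tables nprefix/yprefix, a derived penalty table penalty[c] = nprefix[c] + ytotal - yprefix[c], and a separate earliest-argmin scan over indices 0..n.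
import Mathlib
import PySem

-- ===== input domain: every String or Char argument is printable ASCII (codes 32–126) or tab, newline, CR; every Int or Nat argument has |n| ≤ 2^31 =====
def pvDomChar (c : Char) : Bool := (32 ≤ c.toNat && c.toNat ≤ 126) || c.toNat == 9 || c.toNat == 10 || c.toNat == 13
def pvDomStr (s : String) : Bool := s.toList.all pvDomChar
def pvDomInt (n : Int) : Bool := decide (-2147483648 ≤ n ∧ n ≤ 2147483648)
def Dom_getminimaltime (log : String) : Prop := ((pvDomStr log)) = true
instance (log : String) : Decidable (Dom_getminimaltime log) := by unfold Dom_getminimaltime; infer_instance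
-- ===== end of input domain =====

-- B replaces A's single running-penalty pass by materialized prefix-count tables, a derived
-- penalty table and a separate earliest-argmin scan (alternative decomposition, same cost).

-- ===== PORT A =====
-- A's loop body: running penalty update, then strict-min check (state = (penalty, min_penalty, best_closing_time))
def aStep (log : String) (st : Int × Int × Int) (t : Int) : Int × Int × Int :=
  let p := if PySem.List.pyGetD log.toList t ' ' = 'Y' then st.1 - 1 else st.1 + 1
  if p < st.2.1 then (p, p, t + 1) else (p, st.2.1, st.2.2)

def getminimaltime (log : String) : Int :=
  let n : Int := PySem.Str.len log
  let penalty : Int := (PySem.Str.count log "Y" : Int)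
  let st := (PySem.List.pyRange 0 n 1).foldl (aStep log) (penalty, penalty, 0)
  st.2.2

-- ===== PORT B =====
-- B's prefix-building loop body (state = (nprefix, yprefix, ncnt, ycnt))
def altStep (st : List Int × List Int × Int × Int) (ch : Char) : List Int × List Int × Int × Int :=
  let (np, yp, nc, yc) := st
  if ch = 'Y' then (np ++ [nc], yp ++ [yc + 1], nc, yc + 1)
  else (np ++ [nc + 1], yp ++ [yc], nc + 1, yc)

def getminimaltime_alt (log : String) : Int :=
  let ytotal : Int := (PySem.Str.count log "Y" : Int)
  let st := log.toList.foldl altStep ([0], [0], 0, 0)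
  let nprefix := st.1
  let yprefix := st.2.1
  let n : Int := PySem.Str.len log
  let penalty := (PySem.List.pyRange 0 (n + 1) 1).map
      (fun c => PySem.List.pyGetD nprefix c 0 + ytotal - PySem.List.pyGetD yprefix c 0)
  (PySem.List.pyRange 1 (n + 1) 1).foldl
      (fun best c => if PySem.List.pyGetD penalty c 0 < PySem.List.pyGetD penalty best 0 then c else best) 0

-- ===== PRECONDITION & SPEC =====
def Spec_getminimaltime (log : String) (out : Int) : Prop := out = getminimaltime_alt log
instance (log : String) (out : Int) : Decidable (Spec_getminimaltime log out) := by unfold Spec_getminimaltime; infer_instance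

-- ===== CLAIM (what is proved, stated in full; the proofs are below) =====
def Claim_equal_getminimaltime : Prop := ∀ (log : String), Dom_getminimaltime log → Spec_getminimaltime log (getminimaltime log)

-- ===== LEMMAS AND PROOFS =====

-- closed form of B's prefix-building fold
theorem foldl_altStep (l : List Char) (np yp : List Int) (nc yc : Int) :
    l.foldl altStep (np, yp, nc, yc) =
      (np ++ (List.range l.length).map (fun k => nc + ((l.take (k+1)).countP (· ≠ 'Y') : Int)),
       yp ++ (List.range l.length).map (fun k => yc + ((l.take (k+1)).count 'Y' : Int)),
       nc + (l.countP (· ≠ 'Y') : Int), yc + (l.count 'Y' : Int)) := by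
  induction l generalizing np yp nc yc with
  | nil => simp
  | cons ch tl ih =>
    simp only [List.foldl_cons]
    by_cases h : ch = 'Y'
    · rw [show altStep (np, yp, nc, yc) ch = (np ++ [nc], yp ++ [yc + 1], nc, yc + 1) by
        simp [altStep, h]]
      rw [ih]
      simp only [List.length_cons, List.range_succ_eq_map, List.map_cons, List.map_map,
        List.append_assoc, List.singleton_append, List.take_succ_cons, List.take_zero,
        List.countP_cons, List.count_cons, List.countP_nil, List.count_nil, Prod.mk.injEq]
      refine ⟨?_, ?_, ?_, ?_⟩
      · congr 1
        congr 1
        · simp [h]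
        · apply List.map_congr_left; intro k _
          simp [h]
      · congr 1
        congr 1
        · simp [h]
        · apply List.map_congr_left; intro k _
          simp [h]; push_cast; ring
      · simp [h]
      · simp [h]; push_cast; ring
    · rw [show altStep (np, yp, nc, yc) ch = (np ++ [nc + 1], yp ++ [yc], nc + 1, yc) by
        simp [altStep, h]]
      rw [ih]
      simp only [List.length_cons, List.range_succ_eq_map, List.map_cons, List.map_map,
        List.append_assoc, List.singleton_append, List.take_succ_cons, List.take_zero,
        List.countP_cons, List.count_cons, List.countP_nil, List.count_nil, Prod.mk.injEq]
      refine ⟨?_, ?_, ?_, ?_⟩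
      · congr 1
        congr 1
        · simp [h]
        · apply List.map_congr_left; intro k _
          simp [h]; push_cast; ring
      · congr 1
        congr 1
        · simp [h]
        · apply List.map_congr_left; intro k _
          simp [h]
      · simp [h]; push_cast; ring
      · simp [h]

-- the value of the penalty table at index c ≤ n
def penVal (y : Int) (l : List Char) (k : Nat) : Int :=
  ((l.take k).countP (· ≠ 'Y') : Int) + y - ((l.take k).count 'Y' : Int)

theorem penVal_zero (y : Int) (l : List Char) : penVal y l 0 = y := by simp [penVal]

theorem penVal_succ (y : Int) (l : List Char) (k : Nat) (hk : k < l.length) :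
    penVal y l (k+1) = if l[k] = 'Y' then penVal y l k - 1 else penVal y l k + 1 := by
  have ht : l.take (k+1) = l.take k ++ [l[k]] := by
    rw [List.take_add_one, List.getElem?_eq_getElem hk]; rfl
  unfold penVal
  rw [ht]
  by_cases h : l[k] = 'Y' <;>
    simp only [List.countP_append, List.count_append, List.countP_cons, List.count_cons,
      List.countP_nil, List.count_nil, h, reduceIte] <;>
    simp [h] <;> push_cast <;> ring

-- the generic argmin-vs-running-min bridge: A's fold over enumerate equals B's argmin scan
theorem key_bridge (l : List Char) (log : String) (t p mp bt : Int) (F : Int → Int)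
    (hpre : ∀ (k : Nat) (hk : k < l.length), PySem.List.pyGetD log.toList (t + k) ' ' = l[k])
    (hp : p = F t) (hmp : mp = F bt)
    (hstep : ∀ (k : Nat) (hk : k < l.length),
        F (t + k + 1) = if l[k]'hk = 'Y' then F (t + k) - 1 else F (t + k) + 1) :
    ((PySem.List.pyRange t (t + l.length) 1).foldl (aStep log) (p, mp, bt)).2.2 =
      (PySem.List.pyRange (t+1) (t + l.length + 1) 1).foldl
        (fun best c => if F c < F best then c else best) bt := by
  induction l generalizing t p mp bt with
  | nil =>
    simp [PySem.List.pyRange_one_eq_nil]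
  | cons ch tl ih =>
    have hlen : ((ch :: tl).length : Int) = (tl.length : Int) + 1 := by push_cast [List.length_cons]; ring
    have h1 : PySem.List.pyRange t (t + (ch :: tl).length) 1 =
        t :: PySem.List.pyRange (t+1) (t + (ch :: tl).length) 1 := by
      apply PySem.List.pyRange_one_cons
      push_cast
      omega
    have h2 : PySem.List.pyRange (t+1) (t + (ch :: tl).length + 1) 1 =
        (t+1) :: PySem.List.pyRange ((t+1)+1) (t + (ch :: tl).length + 1) 1 := by
      apply PySem.List.pyRange_one_cons
      push_cast
      omega
    have hch : PySem.List.pyGetD log.toList t ' ' = ch := by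
      have := hpre 0 (by simp)
      simpa using this
    have hstep0 := hstep 0 (by simp)
    simp only [List.getElem_cons_zero, Nat.cast_zero, add_zero] at hstep0
    rw [h1, h2, List.foldl_cons, List.foldl_cons]
    have harith : t + ((ch :: tl).length : Int) = (t + 1) + (tl.length : Int) := by
      rw [hlen]; ring
    by_cases hc : ch = 'Y'
    · -- penalty decreases
      have hp' : p - 1 = F (t + 1) := by rw [hstep0, if_pos hc, hp]
      by_cases hlt : p - 1 < mp
      · have hlt' : F (t+1) < F bt := by rw [← hp', ← hmp]; exact hlt
        rw [show aStep log (p, mp, bt) t = (p - 1, p - 1, t + 1) by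
          simp [aStep, hch, hc, hlt]]
        rw [if_pos hlt']
        rw [harith]
        exact ih (t+1) (p-1) (p-1) (t+1) (fun k hk => by
            have := hpre (k+1) (by simpa using Nat.succ_lt_succ hk)
            push_cast at this ⊢; rw [show t + 1 + (k:Int) = t + ((k:Int)+1) by ring]
            simpa using this)
          hp' hp'
          (fun k hk => by
            have := hstep (k+1) (by simpa using Nat.succ_lt_succ hk)
            push_cast at this ⊢
            rw [show t + 1 + (k:Int) + 1 = t + ((k:Int)+1) + 1 by ring,
              show t + 1 + (k:Int) = t + ((k:Int)+1) by ring]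
            simpa using this)
      · have hlt' : ¬ F (t+1) < F bt := by rw [← hp', ← hmp]; exact hlt
        rw [show aStep log (p, mp, bt) t = (p - 1, mp, bt) by
          simp [aStep, hch, hc, hlt]]
        rw [if_neg hlt']
        rw [harith]
        exact ih (t+1) (p-1) mp bt (fun k hk => by
            have := hpre (k+1) (by simpa using Nat.succ_lt_succ hk)
            push_cast at this ⊢; rw [show t + 1 + (k:Int) = t + ((k:Int)+1) by ring]
            simpa using this)
          hp' hmp
          (fun k hk => by
            have := hstep (k+1) (by simpa using Nat.succ_lt_succ hk)
            push_cast at this ⊢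
            rw [show t + 1 + (k:Int) + 1 = t + ((k:Int)+1) + 1 by ring,
              show t + 1 + (k:Int) = t + ((k:Int)+1) by ring]
            simpa using this)
    · -- penalty increases
      have hp' : p + 1 = F (t + 1) := by rw [hstep0, if_neg hc, hp]
      by_cases hlt : p + 1 < mp
      · have hlt' : F (t+1) < F bt := by rw [← hp', ← hmp]; exact hlt
        rw [show aStep log (p, mp, bt) t = (p + 1, p + 1, t + 1) by
          simp [aStep, hch, hc, hlt]]
        rw [if_pos hlt']
        rw [harith]
        exact ih (t+1) (p+1) (p+1) (t+1) (fun k hk => by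
            have := hpre (k+1) (by simpa using Nat.succ_lt_succ hk)
            push_cast at this ⊢; rw [show t + 1 + (k:Int) = t + ((k:Int)+1) by ring]
            simpa using this)
          hp' hp'
          (fun k hk => by
            have := hstep (k+1) (by simpa using Nat.succ_lt_succ hk)
            push_cast at this ⊢
            rw [show t + 1 + (k:Int) + 1 = t + ((k:Int)+1) + 1 by ring,
              show t + 1 + (k:Int) = t + ((k:Int)+1) by ring]
            simpa using this)
      · have hlt' : ¬ F (t+1) < F bt := by rw [← hp', ← hmp]; exact hlt
        rw [show aStep log (p, mp, bt) t = (p + 1, mp, bt) by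
          simp [aStep, hch, hc, hlt]]
        rw [if_neg hlt']
        rw [harith]
        exact ih (t+1) (p+1) mp bt (fun k hk => by
            have := hpre (k+1) (by simpa using Nat.succ_lt_succ hk)
            push_cast at this ⊢; rw [show t + 1 + (k:Int) = t + ((k:Int)+1) by ring]
            simpa using this)
          hp' hmp
          (fun k hk => by
            have := hstep (k+1) (by simpa using Nat.succ_lt_succ hk)
            push_cast at this ⊢
            rw [show t + 1 + (k:Int) + 1 = t + ((k:Int)+1) + 1 by ring,
              show t + 1 + (k:Int) = t + ((k:Int)+1) by ring]
            simpa using this)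

-- B's penalty table evaluates to penVal on indices 0..n
theorem penalty_getD (log : String) (y : Int) (k : Nat) (hk : k ≤ log.toList.length) :
    PySem.List.pyGetD
      ((PySem.List.pyRange 0 ((log.toList.length : Int) + 1) 1).map
        (fun c =>
          PySem.List.pyGetD ((List.range (log.toList.length + 1)).map
              (fun c => ((log.toList.take c).countP (· ≠ 'Y') : Int))) c 0 + y -
          PySem.List.pyGetD ((List.range (log.toList.length + 1)).map
              (fun c => ((log.toList.take c).count 'Y' : Int))) c 0))
      (k : Int) 0 = penVal y log.toList k := by
  have h1 : ((log.toList.length : Int) + 1) = ((log.toList.length + 1 : Nat) : Int) := by push_cast; ring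
  have hk2 : k < log.length + 1 := by simpa using Nat.lt_succ_of_le hk
  rw [h1, PySem.List.pyGetD_map_pyRange _ _ k _ (by omega)]
  rw [PySem.List.pyGetD_natCast, PySem.List.pyGetD_natCast]
  rw [List.getD_eq_getElem?_getD, List.getD_eq_getElem?_getD]
  simp [hk2, penVal]

theorem nprefix_eq (l : List Char) :
    (l.foldl altStep ([0], [0], 0, 0)).1 =
      (List.range (l.length + 1)).map (fun c => ((l.take c).countP (· ≠ 'Y') : Int)) := by
  rw [foldl_altStep]
  rw [List.range_succ_eq_map, List.map_cons, List.map_map]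
  simp [Function.comp]

theorem yprefix_eq (l : List Char) :
    (l.foldl altStep ([0], [0], 0, 0)).2.1 =
      (List.range (l.length + 1)).map (fun c => ((l.take c).count 'Y' : Int)) := by
  rw [foldl_altStep]
  rw [List.range_succ_eq_map, List.map_cons, List.map_map]
  simp [Function.comp]

-- ===== VERDICT (by name: the statement is the Claim_ definition above) =====
theorem getminimaltime_spec : Claim_equal_getminimaltime := by
  intro log _
  unfold Spec_getminimaltime getminimaltime getminimaltime_alt
  simp only [PySem.Str.len_eq]
  set l := log.toList with hl
  set y : Int := (PySem.Str.count log "Y" : Int) with hy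
  rw [nprefix_eq, yprefix_eq]
  set F : Int → Int := fun c =>
      PySem.List.pyGetD
        ((PySem.List.pyRange 0 ((l.length : Int) + 1) 1).map
          (fun c =>
            PySem.List.pyGetD ((List.range (l.length + 1)).map
                (fun c => ((l.take c).countP (· ≠ 'Y') : Int))) c 0 + y -
            PySem.List.pyGetD ((List.range (l.length + 1)).map
                (fun c => ((l.take c).count 'Y' : Int))) c 0))
        c 0 with hF
  have hFval : ∀ (k : Nat), k ≤ l.length → F (k : Int) = penVal y l k := fun k hk =>
    penalty_getD log y k hk
  have h0 : (0 : Int) + (l.length : Int) = (l.length : Int) := by ring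
  rw [show PySem.List.pyRange 0 (l.length : Int) 1 =
        PySem.List.pyRange 0 (0 + (l.length : Int)) 1 by rw [h0]]
  rw [key_bridge l log 0 y y 0 F
    (fun k hk => by
      rw [zero_add, PySem.List.pyGetD_natCast]
      exact List.getD_eq_getElem _ _ hk)
    (by rw [show (0:Int) = ((0:Nat):Int) by norm_num, hFval 0 (Nat.zero_le _), penVal_zero])
    (by rw [show (0:Int) = ((0:Nat):Int) by norm_num, hFval 0 (Nat.zero_le _), penVal_zero])
    (fun k hk => by
      have h2 := hFval (k+1) (Nat.succ_le_of_lt hk)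
      push_cast at h2
      simp only [zero_add, h2, hFval k (Nat.le_of_lt hk)]
      exact penVal_succ y l k hk)]
  simp only [hF, hl, zero_add]
  rfl
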